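-- pv_equiv track=rewrite | github.com/Yellowpagesfamilyscutigeridae996/zpulse | agent/agent.py | parse_pool_status
-- ===== SOURCE A (Python) =====
-- def parse_pool_status(text: str):
-- 	'''
-- 	Parse raw zpool status output into scan text, vdev list, and error summary.
--
-- 	:param text: Raw output from zpool status
-- 	'''
--
-- 	scan_lines = []
-- 	vdevs = []
-- 	errors_summary = ''
-- 	in_scan = False
-- 	in_config = False
-- 	for line in text.splitlines():
-- 		if line.strip().startswith('scan:'):
-- 			in_scan = True
-- 			scan_lines.append(line.split('scan:', 1)[1].strip())
-- 			continue
-- 		if in_scan: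
-- 			if line.startswith('\t') and not line.strip().startswith('NAME'):
-- 				scan_lines.append(line.strip())
-- 			else:
-- 				in_scan = False
-- 		if line.strip().startswith('NAME') and 'STATE' in line:
-- 			in_config = True
-- 			continue
-- 		if in_config:
-- 			if not line.strip() or line.strip().startswith('errors:'):
-- 				in_config = False
-- 				if line.strip().startswith('errors:'):
-- 					errors_summary = line.split('errors:', 1)[1].strip()
-- 				continue
-- 			parts = line.split()
-- 			if len(parts) >= 2:
-- 				vdevs.append({
-- 					'name'  : parts[0],
-- 					'state' : parts[1] if len(parts) > 1 else '',
-- 					'read'  : parts[2] if len(parts) > 2 else '0',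
-- 					'write' : parts[3] if len(parts) > 3 else '0',
-- 					'cksum' : parts[4] if len(parts) > 4 else '0',
-- 					'indent': len(line) - len(line.lstrip()),
-- 				})
-- 	return ' '.join(scan_lines), vdevs, errors_summary
-- ===== SOURCE B (Python) =====
-- def _scan_text(lines):
-- 	pieces = []
-- 	active = False
-- 	for line in lines:
-- 		s = line.strip()
-- 		if s.startswith('scan:'):
-- 			active = True
-- 			pieces.append(line.split('scan:', 1)[1].strip())
-- 		elif active:
-- 			if line.startswith('\t') and not s.startswith('NAME'):
-- 				pieces.append(s)
-- 			else:
-- 				active = False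
-- 	return ' '.join(pieces)
--
--
-- def _config_rows(lines):
-- 	rows = []
-- 	active = False
-- 	for line in lines:
-- 		s = line.strip()
-- 		if s.startswith('scan:'):
-- 			continue
-- 		if s.startswith('NAME') and 'STATE' in line:
-- 			active = True
-- 		elif active:
-- 			if not s or s.startswith('errors:'):
-- 				active = False
-- 			else:
-- 				rows.append(line)
-- 	return rows
--
--
-- def _vdev(line):
-- 	p = line.split()
-- 	return {
-- 		'name'  : p[0],
-- 		'state' : p[1],
-- 		'read'  : p[2] if len(p) > 2 else '0',
-- 		'write' : p[3] if len(p) > 3 else '0',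
-- 		'cksum' : p[4] if len(p) > 4 else '0',
-- 		'indent': len(line) - len(line.lstrip()),
-- 	}
--
--
-- def _errors_summary(lines):
-- 	summary = ''
-- 	active = False
-- 	for line in lines:
-- 		s = line.strip()
-- 		if s.startswith('scan:'):
-- 			continue
-- 		if s.startswith('NAME') and 'STATE' in line:
-- 			active = True
-- 		elif active and (not s or s.startswith('errors:')):
-- 			active = False
-- 			if s.startswith('errors:'):
-- 				summary = line.split('errors:', 1)[1].strip()
-- 	return summary
--
--
-- def parse_pool_status(text: str):
-- 	'''Three independent single-flag passes: scan text, config rows, errors summary.'''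
-- 	lines = text.splitlines()
-- 	vdevs = [_vdev(l) for l in _config_rows(lines) if len(l.split()) >= 2]
-- 	return _scan_text(lines), vdevs, _errors_summary(lines)
-- ===== Notes on version B (the rewrite author's own statement) =====
-- stated objective: alternative
-- what changed: A is one pass with two interacting mode flags and mixed accumulators; B makes three independent single-flag passes (scan text, raw config rows, errors summary) and parses the collected config rows into vdev dicts afterwards with a filter+map.
import Mathlib
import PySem

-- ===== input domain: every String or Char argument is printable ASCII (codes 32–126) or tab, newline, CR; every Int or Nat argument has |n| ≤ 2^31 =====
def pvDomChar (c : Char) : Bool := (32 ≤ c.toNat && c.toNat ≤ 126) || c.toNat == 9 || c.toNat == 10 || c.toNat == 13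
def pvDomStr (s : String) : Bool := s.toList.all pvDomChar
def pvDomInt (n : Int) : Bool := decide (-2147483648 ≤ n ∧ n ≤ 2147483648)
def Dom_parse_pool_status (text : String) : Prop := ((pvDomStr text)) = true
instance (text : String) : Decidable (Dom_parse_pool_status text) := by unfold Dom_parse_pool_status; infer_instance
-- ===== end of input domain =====

-- B replaces A's single two-flag state machine by three independent single-flag passes
-- (scan text / raw config rows / errors summary) with the vdev rows parsed afterwards
-- by filter+map; same O(n) cost, different decomposition (objective: alternative).

-- ===== PORT A =====
-- line.split(sep, 1)[1].strip() — the [1] always exists where A evaluates it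
-- (sep was just seen as a substring of line), so the getD defaults are unreachable.
def pvTail1 (line sep : String) : String :=
  PySem.Str.strip (((PySem.Str.splitMax? line sep 1).getD []).getD 1 "")

-- the dict literal A appends (insertion-order association list; 'indent' stringified)
def pvVdevA (line : String) : List (String × String) :=
  let parts := PySem.Str.split₀ line
  [("name", parts.getD 0 ""),
   ("state", if 1 < parts.length then parts.getD 1 "" else ""),
   ("read", if 2 < parts.length then parts.getD 2 "" else "0"),
   ("write", if 3 < parts.length then parts.getD 3 "" else "0"),
   ("cksum", if 4 < parts.length then parts.getD 4 "" else "0"),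
   ("indent", PySem.Int.toStr ((PySem.Str.len line : Int) - (PySem.Str.len (PySem.Str.lstrip line) : Int)))]

-- A's loop body: state = (scan_lines, vdevs, errors_summary, in_scan, in_config)
def pvStepA (st : List String × List (List (String × String)) × String × Bool × Bool)
    (line : String) :
    List String × List (List (String × String)) × String × Bool × Bool :=
  if PySem.Str.startswith (PySem.Str.strip line) "scan:" then
    (st.1 ++ [pvTail1 line "scan:"], st.2.1, st.2.2.1, true, st.2.2.2.2)
  else
    let scan2 : List String × Bool :=
      if st.2.2.2.1 then
        if PySem.Str.startswith line "\t" && !(PySem.Str.startswith (PySem.Str.strip line) "NAME") then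
          (st.1 ++ [PySem.Str.strip line], st.2.2.2.1)
        else (st.1, false)
      else (st.1, st.2.2.2.1)
    if PySem.Str.startswith (PySem.Str.strip line) "NAME" && PySem.Str.isIn "STATE" line then
      (scan2.1, st.2.1, st.2.2.1, scan2.2, true)
    else if st.2.2.2.2 then
      if PySem.Str.strip line == "" || PySem.Str.startswith (PySem.Str.strip line) "errors:" then
        (scan2.1, st.2.1,
         if PySem.Str.startswith (PySem.Str.strip line) "errors:" then pvTail1 line "errors:" else st.2.2.1,
         scan2.2, false)
      else if 2 ≤ (PySem.Str.split₀ line).length then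
        (scan2.1, st.2.1 ++ [pvVdevA line], st.2.2.1, scan2.2, st.2.2.2.2)
      else (scan2.1, st.2.1, st.2.2.1, scan2.2, st.2.2.2.2)
    else (scan2.1, st.2.1, st.2.2.1, scan2.2, st.2.2.2.2)

def parse_pool_status (text : String) : String × (List (List (String × String))) × String :=
  let fin := (PySem.Str.splitlines text).foldl pvStepA ([], [], "", false, false)
  (PySem.Str.join " " fin.1, fin.2.1, fin.2.2.1)

-- ===== PORT B =====
-- pass 1: collect the scan text pieces; state = (pieces, active)
def pvScanStep (st : List String × Bool) (line : String) : List String × Bool :=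
  if PySem.Str.startswith (PySem.Str.strip line) "scan:" then
    (st.1 ++ [pvTail1 line "scan:"], true)
  else if st.2 then
    if PySem.Str.startswith line "\t" && !(PySem.Str.startswith (PySem.Str.strip line) "NAME") then
      (st.1 ++ [PySem.Str.strip line], true)
    else (st.1, false)
  else st

-- pass 2: collect the raw config rows; state = (rows, active)
def pvRowStep (st : List String × Bool) (line : String) : List String × Bool :=
  if PySem.Str.startswith (PySem.Str.strip line) "scan:" then st
  else if PySem.Str.startswith (PySem.Str.strip line) "NAME" && PySem.Str.isIn "STATE" line then
    (st.1, true)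
  else if st.2 then
    if PySem.Str.strip line == "" || PySem.Str.startswith (PySem.Str.strip line) "errors:" then
      (st.1, false)
    else (st.1 ++ [line], true)
  else st

-- pass 3: the errors summary; state = (summary, active)
def pvErrStep (st : String × Bool) (line : String) : String × Bool :=
  if PySem.Str.startswith (PySem.Str.strip line) "scan:" then st
  else if PySem.Str.startswith (PySem.Str.strip line) "NAME" && PySem.Str.isIn "STATE" line then
    (st.1, true)
  else if st.2 && (PySem.Str.strip line == "" || PySem.Str.startswith (PySem.Str.strip line) "errors:") then
    ((if PySem.Str.startswith (PySem.Str.strip line) "errors:" then pvTail1 line "errors:" else st.1), false)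
  else st

-- len(l.split()) >= 2
def pvHasTwo (l : String) : Bool := decide (2 ≤ (PySem.Str.split₀ l).length)

-- _vdev: the dict built from a kept config row (p[0], p[1] exist: pvHasTwo holds)
def pvVdevB (line : String) : List (String × String) :=
  let p := PySem.Str.split₀ line
  [("name", p.getD 0 ""),
   ("state", p.getD 1 ""),
   ("read", if 2 < p.length then p.getD 2 "" else "0"),
   ("write", if 3 < p.length then p.getD 3 "" else "0"),
   ("cksum", if 4 < p.length then p.getD 4 "" else "0"),
   ("indent", PySem.Int.toStr ((PySem.Str.len line : Int) - (PySem.Str.len (PySem.Str.lstrip line) : Int)))]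

def parse_pool_status_alt (text : String) : String × (List (List (String × String))) × String :=
  let lines := PySem.Str.splitlines text
  (PySem.Str.join " " (lines.foldl pvScanStep ([], false)).1,
   (((lines.foldl pvRowStep ([], false)).1.filter pvHasTwo).map pvVdevB),
   (lines.foldl pvErrStep ("", false)).1)

-- ===== PRECONDITION & SPEC =====
def Spec_parse_pool_status (text : String) (out : String × (List (List (String × String))) × String) : Prop := out = parse_pool_status_alt text
instance (text : String) (out : String × (List (List (String × String))) × String) : Decidable (Spec_parse_pool_status text out) := by unfold Spec_parse_pool_status; infer_instance

-- ===== CLAIM (what is proved, stated in full; the proofs are below) =====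
def Claim_equal_parse_pool_status : Prop := ∀ (text : String), Dom_parse_pool_status text → Spec_parse_pool_status text (parse_pool_status text)

-- ===== LEMMAS AND PROOFS =====

-- the errors pass and the rows pass drive the same flag
theorem pvErrStep_flag (e : String) (r : List String) (c : Bool) (l : String) :
    (pvErrStep (e, c) l).2 = (pvRowStep (r, c) l).2 := by
  simp only [pvErrStep, pvRowStep]
  cases c <;> split_ifs <;> simp_all

-- the rows accumulator only ever grows at the back
theorem pvRowStep_shift : ∀ (t : List String) (acc : List String) (b : Bool),
    t.foldl pvRowStep (acc, b)
      = (acc ++ (t.foldl pvRowStep ([], b)).1, (t.foldl pvRowStep ([], b)).2)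
  | [], acc, b => by simp
  | l :: t, acc, b => by
    rcases hP : pvRowStep ([], b) l with ⟨r1, b1⟩
    have hstep : pvRowStep (acc, b) l = (acc ++ r1, b1) := by
      have h : pvRowStep (acc, b) l
          = (acc ++ (pvRowStep ([], b) l).1, (pvRowStep ([], b) l).2) := by
        simp only [pvRowStep]; split_ifs <;> simp
      rw [h, hP]
    simp only [List.foldl_cons, hstep, hP]
    rw [pvRowStep_shift t (acc ++ r1) b1, pvRowStep_shift t r1 b1]
    simp

theorem pvVdevA_eq_pvVdevB (l : String) (h : 2 ≤ (PySem.Str.split₀ l).length) :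
    pvVdevA l = pvVdevB l := by
  have h1 : 1 < (PySem.Str.split₀ l).length := by omega
  simp only [pvVdevA, pvVdevB, if_pos h1]

-- one step of A, decomposed into one step of each of B's three passes
theorem pvStepA_decompose (scan : List String) (vdevs : List (List (String × String)))
    (err : String) (inS inC : Bool) (l : String) :
    pvStepA (scan, vdevs, err, inS, inC) l =
      ((pvScanStep (scan, inS) l).1,
       vdevs ++ ((pvRowStep ([], inC) l).1.filter pvHasTwo).map pvVdevB,
       (pvErrStep (err, inC) l).1,
       (pvScanStep (scan, inS) l).2,
       (pvRowStep ([], inC) l).2) := by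
  simp only [pvStepA, pvScanStep, pvRowStep, pvErrStep]
  cases inS <;> cases inC <;> split_ifs <;>
    (try simp_all [pvVdevA_eq_pvVdevB]) <;> (try simp_all [pvHasTwo])

-- the loop invariant: A's fold equals the three B folds at every point
theorem pvMain : ∀ (lines : List String) (scan : List String)
    (vdevs : List (List (String × String))) (err : String) (inS inC : Bool),
    lines.foldl pvStepA (scan, vdevs, err, inS, inC) =
      ((lines.foldl pvScanStep (scan, inS)).1,
       vdevs ++ ((lines.foldl pvRowStep ([], inC)).1.filter pvHasTwo).map pvVdevB,
       (lines.foldl pvErrStep (err, inC)).1,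
       (lines.foldl pvScanStep (scan, inS)).2,
       (lines.foldl pvRowStep ([], inC)).2)
  | [], scan, vdevs, err, inS, inC => by simp
  | l :: t, scan, vdevs, err, inS, inC => by
    rcases hS : pvScanStep (scan, inS) l with ⟨s1, b1⟩
    rcases hR : pvRowStep ([], inC) l with ⟨r1, c1⟩
    rcases hE : pvErrStep (err, inC) l with ⟨e1, c1'⟩
    have hc : c1' = c1 := by
      have := pvErrStep_flag err ([] : List String) inC l
      rw [hE, hR] at this; exact this
    rw [hc] at hE
    simp only [List.foldl_cons, pvStepA_decompose, hS, hR, hE]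
    rw [pvMain t s1 (vdevs ++ (r1.filter pvHasTwo).map pvVdevB) e1 b1 c1]
    rw [pvRowStep_shift t r1 c1]
    simp [List.filter_append, List.map_append, List.append_assoc]

-- ===== VERDICT (by name: the statement is the Claim_ definition above) =====
theorem parse_pool_status_spec : Claim_equal_parse_pool_status := by
  intro text _hdom
  show parse_pool_status text = parse_pool_status_alt text
  simp only [parse_pool_status, parse_pool_status_alt, pvMain, List.nil_append]
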